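-- pv_equiv track=rewrite | github.com/Rubal0990/GFG-DSA | Transform String - GFG/transform-string.py | transform
-- ===== SOURCE A (Python) =====
-- def transform(A, B):
--     if A == B:
--         return 0
--
--     listA = list(A)
--     listB = list(B)
--     lenA = len(listA)
--     lenB = len(listB)
--     count1 = 0
--     count2 = 0
--     newDict2 = {}
--     newDict1 = {}
--     temp1 = temp2 = lenA-1
--     count = 0
--
--     if lenA != lenB:
--         return -1
--
--     while temp1 >= 0:
--         if listA[temp1] == listB[temp2]:
--             temp2 -= 1
--         else:
--             if listA[temp1] in newDict1:
--                 newDict1[listA[temp1]] += 1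
--             else:
--                 newDict1[listA[temp1]] = 1
--             count += 1
--         temp1 -= 1
--
--     for i in range(count):
--         if listB[i] in newDict2:
--             newDict2[listB[i]] += 1
--         else:
--             newDict2[listB[i]] = 1
--
--     try:
--         for i in newDict1:
--             if (i in newDict2) and (newDict1[i] == newDict2[i]):
--                 continue
--             else:
--                 return -1
--     except:
--         return -1
--
--     return count
-- ===== SOURCE B (Python) =====
-- def transform(A, B):
--     if A == B:
--         return 0
--     if len(A) != len(B):
--         return -1
--     if sorted(A) != sorted(B):
--         return -1
--     count = 0
--     j = len(B) - 1
--     for ch in reversed(A):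
--         if j >= 0 and ch == B[j]:
--             j -= 1
--         else:
--             count += 1
--     return count
-- ===== Notes on version B (the rewrite author's own statement) =====
-- stated objective: simpler
-- what changed: B replaces A's three-loop dict bookkeeping (unmatched-char dict from the backward scan, a second dict over B's first `count` chars, and a key-by-key comparison loop) with one whole-string anagram check sorted(A)!=sorted(B) up front followed by a single backward two-pointer counting pass.
import Mathlib
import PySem

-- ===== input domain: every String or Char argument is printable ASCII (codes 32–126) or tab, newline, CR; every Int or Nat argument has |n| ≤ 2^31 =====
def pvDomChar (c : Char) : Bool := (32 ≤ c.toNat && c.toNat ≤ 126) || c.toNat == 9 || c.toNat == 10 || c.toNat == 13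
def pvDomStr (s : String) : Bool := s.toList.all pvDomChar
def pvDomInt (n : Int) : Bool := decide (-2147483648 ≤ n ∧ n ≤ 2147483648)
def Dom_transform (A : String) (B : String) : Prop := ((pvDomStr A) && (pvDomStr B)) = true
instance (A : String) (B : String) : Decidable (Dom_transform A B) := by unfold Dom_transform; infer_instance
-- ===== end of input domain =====

-- B replaces A's three-loop dict bookkeeping with one whole-string anagram check (sorted(A) != sorted(B))
-- followed by a single backward two-pointer counting pass (objective: simpler).

-- ===== PORT A =====

-- `if c in d: d[c] += 1 else: d[c] = 1`
def pvIncr (d : PySem.Dict Char Int) (c : Char) : PySem.Dict Char Int :=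
  if d.contains c then d.insert c (d.getD c 0 + 1) else d.insert c 1

-- the `while temp1 >= 0` loop of A, carrying (newDict1, count)
def pvLoopA (listA listB : List Char) (temp1 temp2 : Int)
    (d1 : PySem.Dict Char Int) (count : Int) : PySem.Dict Char Int × Int :=
  if _h : 0 ≤ temp1 then
    if PySem.List.pyGet? listA temp1 = PySem.List.pyGet? listB temp2 then
      pvLoopA listA listB (temp1 - 1) (temp2 - 1) d1 count
    else
      match PySem.List.pyGet? listA temp1 with
      | some c => pvLoopA listA listB (temp1 - 1) temp2 (pvIncr d1 c) (count + 1)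
      | none => (d1, count)  -- unreachable from `transform`: temp1 is always a valid index of listA
  else (d1, count)
termination_by (temp1 + 1).toNat
decreasing_by all_goals omega

def transform (A : String) (B : String) : Int :=
  if A = B then 0
  else
    let listA := A.toList
    let listB := B.toList
    let lenA : Int := listA.length
    let lenB : Int := listB.length
    if lenA ≠ lenB then -1
    else
      let r := pvLoopA listA listB (lenA - 1) (lenA - 1) PySem.Dict.empty 0
      let newDict1 := r.1
      let count := r.2
      -- `for i in range(count): …` building newDict2 from listB[i]
      let newDict2 := (PySem.List.pyRange 0 count 1).foldl
        (fun d i => match PySem.List.pyGet? listB i with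
          | some c => pvIncr d c
          | none => d)  -- unreachable from `transform`: i < count ≤ len(listB)
        PySem.Dict.empty
      -- `for i in newDict1: if (i in newDict2) and (newDict1[i] == newDict2[i]): continue else: return -1`
      -- (the try/except around this loop is dead: its body cannot raise)
      if newDict1.keys.all (fun i => newDict2.contains i && (newDict1.getD i 0 == newDict2.getD i 0))
      then count else -1

-- ===== PORT B =====

def transform_alt (A : String) (B : String) : Int :=
  if A = B then 0
  else if (A.toList.length : Int) ≠ (B.toList.length : Int) then -1
  else if PySem.List.sorted A.toList (fun x => x) false ≠ PySem.List.sorted B.toList (fun x => x) false then -1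
  else
    let listB := B.toList
    let r := A.toList.reverse.foldl
      (fun (s : Int × Int) ch =>
        if 0 ≤ s.1 && (PySem.List.pyGet? listB s.1 == some ch) then (s.1 - 1, s.2)
        else (s.1, s.2 + 1))
      ((listB.length : Int) - 1, 0)
    r.2

-- ===== PRECONDITION & SPEC =====
def Spec_transform (A : String) (B : String) (out : Int) : Prop := out = transform_alt A B
instance (A : String) (B : String) (out : Int) : Decidable (Spec_transform A B out) := by unfold Spec_transform; infer_instance

-- ===== CLAIM (what is proved, stated in full; the proofs are below) =====
def Claim_equal_transform : Prop := ∀ (A : String) (B : String), Dom_transform A B → Spec_transform A B (transform A B)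

-- ===== LEMMAS AND PROOFS =====

-- the greedy backward matching both programs perform: first argument is reversed A, second the
-- reversed not-yet-matched part of B; returns the unmatched characters of A in processing order
def pvGreedy : List Char → List Char → List Char
  | [], _ => []
  | a :: ra, [] => a :: pvGreedy ra []
  | a :: ra, b :: rb => if a = b then pvGreedy ra rb else a :: pvGreedy ra (b :: rb)

lemma pvGreedy_length_le (ra rb : List Char) : (pvGreedy ra rb).length ≤ ra.length := by
  fun_induction pvGreedy with
  | case1 => simp
  | case2 a ra ih => simpa using ih
  | case3 ra b rb ih => simp only [List.length_cons]; omega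
  | case4 a ra b rb h ih => simp only [List.length_cons]; omega

-- conservation: the unmatched characters plus the consumed part of B are A plus B (as multisets)
lemma pvGreedy_multiset (ra rb : List Char) :
    (ra : Multiset Char) + (rb.drop (ra.length - (pvGreedy ra rb).length) : List Char) =
      (pvGreedy ra rb : List Char) + (rb : Multiset Char) := by
  fun_induction pvGreedy with
  | case1 => simp
  | case2 a ra ih =>
      simp only [List.drop_nil] at *
      simp only [Multiset.coe_nil, add_zero] at ih ⊢
      simp [← Multiset.cons_coe, ih]
  | case3 ra b rb ih =>
      have hle := pvGreedy_length_le ra rb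
      simp only [List.length_cons]
      have h2 : (ra.length + 1) - (pvGreedy ra rb).length = (ra.length - (pvGreedy ra rb).length) + 1 := by omega
      rw [h2, List.drop_succ_cons]
      simp only [← Multiset.cons_coe]
      rw [Multiset.cons_add, ih]
      rw [Multiset.add_cons]
  | case4 a ra b rb h ih =>
      simp only [List.length_cons]
      have hle := pvGreedy_length_le ra (b :: rb)
      have h2 : (ra.length + 1) - ((pvGreedy ra (b :: rb)).length + 1) = ra.length - (pvGreedy ra (b :: rb)).length := by omega
      rw [h2]
      simp only [← Multiset.cons_coe]
      rw [Multiset.cons_add, Multiset.cons_add, ih]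
      simp [Multiset.cons_coe]

lemma pvIncr_eq (d : PySem.Dict Char Int) (c : Char) :
    pvIncr d c = d.insert c (d.getD c 0 + 1) := by
  unfold pvIncr
  by_cases h : d.contains c
  · simp [h]
  · have h0 : d.getD c 0 = 0 := PySem.Dict.getD_of_not_contains d 0 (by simpa using h)
    simp [h, h0]

lemma pvFoldl_pvIncr_counter (u : List Char) :
    u.foldl pvIncr PySem.Dict.empty = PySem.Dict.counter u := by
  have h : pvIncr = fun d x => d.insert x (d.getD x 0 + 1) := funext₂ pvIncr_eq
  rw [h, PySem.Dict.foldl_insert_getD_add_one_eq_counter]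

-- A's while loop is the greedy matching on the reversed taken prefixes
lemma pvLoopA_spec (lA lB : List Char) :
    ∀ (t1 t2 : Int) (d : PySem.Dict Char Int) (c : Int),
      t1 ≤ t2 → t1 < lA.length → t2 < lB.length →
      pvLoopA lA lB t1 t2 d c =
        ((pvGreedy ((lA.take (t1 + 1).toNat).reverse) ((lB.take (t2 + 1).toNat).reverse)).foldl pvIncr d,
         c + (pvGreedy ((lA.take (t1 + 1).toNat).reverse) ((lB.take (t2 + 1).toNat).reverse)).length) := by
  intro t1
  induction h : (t1 + 1).toNat generalizing t1 with
  | zero =>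
      intro t2 d c h12 h1 h2
      rw [pvLoopA, dif_neg (by omega)]
      simp [pvGreedy]
  | succ m ih =>
      intro t2 d c h12 h1 h2
      have h0 : 0 ≤ t1 := by omega
      have h02 : 0 ≤ t2 := by omega
      have h1n : t1.toNat < lA.length := by omega
      have h2n : t2.toNat < lB.length := by omega
      have hga : PySem.List.pyGet? lA t1 = some lA[t1.toNat] :=
        PySem.List.pyGet?_eq_some_getElem lA h0 h1
      have hgb : PySem.List.pyGet? lB t2 = some lB[t2.toNat] :=
        PySem.List.pyGet?_eq_some_getElem lB h02 h2
      have hta : List.take (m + 1) lA = List.take t1.toNat lA ++ [lA[t1.toNat]] := by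
        rw [show m + 1 = t1.toNat + 1 by omega, List.take_add_one,
          List.getElem?_eq_getElem h1n]
        rfl
      have htb : List.take (t2 + 1).toNat lB = List.take t2.toNat lB ++ [lB[t2.toNat]] := by
        rw [show (t2 + 1).toNat = t2.toNat + 1 by omega, List.take_add_one,
          List.getElem?_eq_getElem h2n]
        rfl
      rw [pvLoopA, dif_pos h0, hga, hgb]
      rw [hta, htb, List.reverse_append, List.reverse_append]
      simp only [List.reverse_cons, List.reverse_nil, List.nil_append, List.singleton_append]
      by_cases heq : lA[t1.toNat] = lB[t2.toNat]
      · rw [if_pos (by rw [heq])]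
        rw [ih (t1 - 1) (by omega) (t2 - 1) d c (by omega) (by omega) (by omega)]
        rw [show (t2 - 1 + 1).toNat = t2.toNat by omega, show m = t1.toNat by omega]
        simp [pvGreedy, heq]
      · rw [if_neg (by simpa using heq)]
        rw [ih (t1 - 1) (by omega) t2 (pvIncr d lA[t1.toNat]) (c + 1) (by omega) (by omega) h2]
        rw [show m = t1.toNat by omega, htb, List.reverse_append]
        simp only [List.reverse_cons, List.reverse_nil, List.nil_append, List.singleton_append]
        simp [pvGreedy, heq]
        ring

-- B's counting fold is the length of the same greedy matching
lemma pvLoopB_spec (lB : List Char) :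
    ∀ (ra : List Char) (j c : Int), j < lB.length →
      (ra.foldl
        (fun (s : Int × Int) ch =>
          if 0 ≤ s.1 && (PySem.List.pyGet? lB s.1 == some ch) then (s.1 - 1, s.2)
          else (s.1, s.2 + 1)) (j, c)).2 =
      c + (pvGreedy ra ((lB.take (j + 1).toNat).reverse)).length := by
  intro ra
  induction ra with
  | nil => intro j c hj; simp [pvGreedy]
  | cons a ra ih =>
      intro j c hj
      by_cases h0 : 0 ≤ j
      · have hjn : j.toNat < lB.length := by omega
        have hg : PySem.List.pyGet? lB j = some lB[j.toNat] :=
          PySem.List.pyGet?_eq_some_getElem lB h0 hj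
        have ht : List.take (j + 1).toNat lB = List.take j.toNat lB ++ [lB[j.toNat]] := by
          have h1 : (j + 1).toNat = j.toNat + 1 := by omega
          rw [h1, List.take_add_one, List.getElem?_eq_getElem hjn]
          rfl
        rw [ht, List.reverse_append]
        simp only [List.reverse_cons, List.reverse_nil, List.nil_append, List.singleton_append]
        by_cases heq : a = lB[j.toNat]
        · subst heq
          simp only [List.foldl_cons, hg]
          rw [if_pos (by simp [h0])]
          rw [ih (j - 1) c (by omega)]
          rw [show (j - 1 + 1).toNat = j.toNat by omega]
          simp [pvGreedy]
        · simp only [List.foldl_cons, hg]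
          rw [if_neg (by simp [h0]; exact fun hx => heq hx.symm)]
          rw [ih j (c + 1) hj, ht, List.reverse_append]
          simp only [List.reverse_cons, List.reverse_nil, List.nil_append, List.singleton_append]
          simp [pvGreedy, heq]
          ring
      · have hcond : (0 ≤ j && (PySem.List.pyGet? lB j == some a)) = false := by
          simp; omega
        have htz : (j + 1).toNat = 0 := by omega
        simp only [List.foldl_cons, hcond, if_neg Bool.false_ne_true]
        rw [ih j (c + 1) hj]
        rw [htz]
        simp [pvGreedy]
        ring

-- the `for i in range(count)` dict over listB[i] is the counting fold over B's first k characters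
lemma pvDict2_eq_fold_take (lB : List Char) (k : Nat) (hk : k ≤ lB.length) :
    (PySem.List.pyRange 0 (k : Int) 1).foldl
      (fun d i => match PySem.List.pyGet? lB i with
        | some c => pvIncr d c
        | none => d) PySem.Dict.empty =
    (lB.take k).foldl pvIncr PySem.Dict.empty := by
  induction k with
  | zero => simp [PySem.List.pyRange_one_eq_nil]
  | succ m ih =>
      have hm : m ≤ lB.length := by omega
      rw [show ((m + 1 : Nat) : Int) = (m : Int) + 1 by push_cast; ring]
      rw [PySem.List.pyRange_one_succ_right (by positivity)]
      rw [List.foldl_append, ih hm]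
      have hg : PySem.List.pyGet? lB (m : Int) = some lB[m] := by
        rw [PySem.List.pyGet?_natCast]
        exact List.getElem?_eq_getElem (by omega)
      simp only [List.foldl_cons, List.foldl_nil, hg]
      have ht : List.take (m + 1) lB = List.take m lB ++ [lB[m]] := by
        rw [List.take_add_one, List.getElem?_eq_getElem (by omega)]
        rfl
      rw [ht, List.foldl_append]
      simp

-- A's key-by-key dict comparison succeeds exactly when the two counted lists agree as multisets
lemma pvCheck_iff (u v : List Char) (hlen : u.length = v.length) :
    ((PySem.Dict.counter u).keys.all
      (fun i => (PySem.Dict.counter v).contains i &&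
        ((PySem.Dict.counter u).getD i 0 == (PySem.Dict.counter v).getD i 0)) = true)
    ↔ (u : Multiset Char) = (v : Multiset Char) := by
  rw [List.all_eq_true]
  constructor
  · intro hall
    have key : ∀ k ∈ u, List.count k u = List.count k v := by
      intro k hk
      have hk' : k ∈ (PySem.Dict.counter u).keys := by
        rw [PySem.Dict.keys_counter]
        exact (PySem.Set.mem_ofList _ _).mpr hk
      have h := hall _ hk'
      rw [Bool.and_eq_true, beq_iff_eq, PySem.Dict.getD_counter, PySem.Dict.getD_counter] at h
      exact_mod_cast h.2
    have hle : (u : Multiset Char) ≤ (v : Multiset Char) := by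
      rw [Multiset.le_iff_count]
      intro c
      by_cases hc : c ∈ u
      · simp [Multiset.coe_count, key c hc]
      · simp [Multiset.coe_count, List.count_eq_zero_of_not_mem hc]
    exact (Multiset.eq_of_le_of_card_le hle (by simpa using hlen.ge))
  · intro hm k hk
    have hperm : u.Perm v := Multiset.coe_eq_coe.mp hm
    rw [PySem.Dict.keys_counter] at hk
    have hku : k ∈ u := (PySem.Set.mem_ofList _ _).mp hk
    have hkv : k ∈ v := hperm.mem_iff.mp hku
    rw [Bool.and_eq_true, beq_iff_eq, PySem.Dict.getD_counter, PySem.Dict.getD_counter,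
      PySem.Dict.contains_counter]
    constructor
    · simpa using hkv
    · exact_mod_cast hperm.count_eq k

-- ===== VERDICT (by name: the statement is the Claim_ definition above) =====
theorem transform_spec : Claim_equal_transform := by
  intro A B _
  unfold Spec_transform transform transform_alt
  by_cases hAB : A = B
  · simp [hAB]
  · rw [if_neg hAB, if_neg hAB]
    by_cases hlen : (A.toList.length : Int) ≠ (B.toList.length : Int)
    · rw [if_pos hlen, if_pos hlen]
    · rw [if_neg hlen, if_neg hlen]
      rw [ne_eq, not_not] at hlen
      have hl : A.toList.length = B.toList.length := by exact_mod_cast hlen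
      set lA := A.toList with hlA
      set lB := B.toList with hlB
      set u := pvGreedy lA.reverse lB.reverse with hu
      have hu_le : u.length ≤ lB.length := by
        have h1 := pvGreedy_length_le lA.reverse lB.reverse
        rw [List.length_reverse, hl] at h1
        exact h1
      -- A's while loop
      have hL : pvLoopA lA lB ((lA.length : Int) - 1) ((lA.length : Int) - 1) PySem.Dict.empty 0
          = (u.foldl pvIncr PySem.Dict.empty, 0 + (u.length : Int)) := by
        rw [pvLoopA_spec lA lB _ _ _ _ le_rfl (by omega) (by rw [hl]; omega)]
        rw [show ((lA.length : Int) - 1 + 1).toNat = lA.length from by omega]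
        rw [hl, List.take_length, ← hl, List.take_length]
      -- the multiset conservation identity, with the remaining part of B rewritten to take
      have hkey : (lA : Multiset Char) + ((lB.take u.length : List Char) : Multiset Char)
          = (u : Multiset Char) + (lB : Multiset Char) := by
        have h1 := pvGreedy_multiset lA.reverse lB.reverse
        rw [List.length_reverse, hl, ← hu] at h1
        rw [← List.reverse_take] at h1
        simpa using h1
      have hv : (lB.take u.length).length = u.length := by
        rw [List.length_take]
        omega
      by_cases hperm : lA.Perm lB
      · -- anagrams: both return the unmatched count
        have hsort : (PySem.List.sorted lA fun x => x) = PySem.List.sorted lB fun x => x :=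
          (PySem.List.sorted_id_eq_sorted_id_iff_perm lA lB).mpr hperm
        rw [if_neg (not_not_intro hsort)]
        have huv : (u : Multiset Char) = ((lB.take u.length : List Char) : Multiset Char) := by
          have hab : (lA : Multiset Char) = (lB : Multiset Char) := Multiset.coe_eq_coe.mpr hperm
          rw [hab] at hkey
          rw [add_comm] at hkey
          exact (add_right_cancel hkey).symm
        have hchk := (pvCheck_iff u (lB.take u.length) hv.symm).mpr huv
        simp only [hL, zero_add]
        rw [pvDict2_eq_fold_take lB u.length hu_le, pvFoldl_pvIncr_counter,
          pvFoldl_pvIncr_counter, if_pos hchk]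
        rw [pvLoopB_spec lB lA.reverse ((lB.length : Int) - 1) 0 (by omega)]
        rw [show ((lB.length : Int) - 1 + 1).toNat = lB.length from by omega, List.take_length,
          zero_add, ← hu]
      · -- not anagrams: both return -1
        have hsort : ¬ (PySem.List.sorted lA fun x => x) = PySem.List.sorted lB fun x => x :=
          fun h => hperm ((PySem.List.sorted_id_eq_sorted_id_iff_perm lA lB).mp h)
        rw [if_pos hsort]
        have hchk : ¬ ((PySem.Dict.counter u).keys.all
            (fun i => (PySem.Dict.counter (lB.take u.length)).contains i &&
              ((PySem.Dict.counter u).getD i 0 == (PySem.Dict.counter (lB.take u.length)).getD i 0)) = true) := by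
          intro hc
          apply hperm
          apply Multiset.coe_eq_coe.mp
          have huv := (pvCheck_iff u (lB.take u.length) hv.symm).mp hc
          rw [huv, add_comm] at hkey
          exact add_left_cancel hkey
        simp only [hL, zero_add]
        rw [pvDict2_eq_fold_take lB u.length hu_le, pvFoldl_pvIncr_counter,
          pvFoldl_pvIncr_counter, if_neg hchk]
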